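-- pv_equiv track=rewrite | github.com/ZXY39/G3KU-Agent | g3ku/runtime/frontdoor/tool_contract.py | _render_attachment_reopen_target_section
-- ===== SOURCE A (Python) =====
-- from typing import Any
--
-- def _normalized_attachment_reopen_targets(items: list[Any] | None) -> list[dict[str, str]]:
--     ordered: list[dict[str, str]] = []
--     seen: set[str] = set()
--     for item in list(items or []):
--         if not isinstance(item, dict):
--             continue
--         path = str(item.get('path') or '').strip()
--         ref = str(item.get('ref') or '').strip()
--         if not path and not ref:
--             continue
--         dedupe_key = ref or path
--         if not dedupe_key or dedupe_key in seen:
--             continue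
--         seen.add(dedupe_key)
--         entry = {
--             'name': str(item.get('name') or path or ref).strip() or (path or ref),
--             'kind': str(item.get('kind') or '').strip(),
--             'mime_type': str(item.get('mime_type') or item.get('mimeType') or '').strip(),
--             'path': path,
--             'ref': ref,
--         }
--         ordered.append({key: value for key, value in entry.items() if value})
--     return ordered
--
-- def _render_attachment_reopen_target_section(items: list[dict[str, str]] | None) -> list[str]:
--     normalized_items = _normalized_attachment_reopen_targets(items)
--     if not normalized_items:
--         return []
--     lines = [
--         'attachment_reopen_targets:',
--         '- These uploaded files remain reopenable in later turns.',
--         '- If a detached task must read one of them, copy the exact `path:` or `ref:` into `create_async_task.file_targets`.',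
--         '- `create_async_task.file_targets` is the authoritative reopen lane for detached tasks.',
--         '- A bare filename like `resume.docx` is not a valid reopen target; use the exact absolute `path` or exact `ref`.',
--         '- If you provide `path`, runtime rejects relative paths and paths that do not point to an existing file.',
--         '- In `create_async_task.task`, describe why the file matters and how it should be used, but do not rely on prose alone for reopen handles.',
--         '- Do not replace them with placeholders like `current_uploads`, `user_uploads`, or `user_image_and_docx`.',
--     ]
--     for item in normalized_items:
--         name = str(item.get('name') or '').strip() or 'attachment'
--         kind = str(item.get('kind') or '').strip() or 'file'
--         mime_type = str(item.get('mime_type') or '').strip() or 'application/octet-stream'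
--         details = [f'kind={kind}', f'mime_type={mime_type}']
--         path = str(item.get('path') or '').strip()
--         ref = str(item.get('ref') or '').strip()
--         if path:
--             details.append(f'path={path}')
--         if ref:
--             details.append(f'ref={ref}')
--         lines.append(f'- `{name}`: ' + '; '.join(details))
--     return lines
-- ===== SOURCE B (Python) =====
-- def _render_attachment_reopen_target_section(items):
--     lines = []
--     seen = set()
--     for item in list(items or []):
--         if not isinstance(item, dict):
--             continue
--         path = str(item.get('path') or '').strip()
--         ref = str(item.get('ref') or '').strip()
--         key = ref or path
--         if not key or key in seen:
--             continue
--         seen.add(key)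
--         name = str(item.get('name') or '').strip() or path or ref
--         kind = str(item.get('kind') or '').strip() or 'file'
--         mime = str(item.get('mime_type') or item.get('mimeType') or '').strip() or 'application/octet-stream'
--         line = f'- `{name}`: kind={kind}; mime_type={mime}'
--         if path:
--             line += f'; path={path}'
--         if ref:
--             line += f'; ref={ref}'
--         lines.append(line)
--     if not lines:
--         return []
--     return [
--         'attachment_reopen_targets:',
--         '- These uploaded files remain reopenable in later turns.',
--         '- If a detached task must read one of them, copy the exact `path:` or `ref:` into `create_async_task.file_targets`.',
--         '- `create_async_task.file_targets` is the authoritative reopen lane for detached tasks.',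
--         '- A bare filename like `resume.docx` is not a valid reopen target; use the exact absolute `path` or exact `ref`.',
--         '- If you provide `path`, runtime rejects relative paths and paths that do not point to an existing file.',
--         '- In `create_async_task.task`, describe why the file matters and how it should be used, but do not rely on prose alone for reopen handles.',
--         '- Do not replace them with placeholders like `current_uploads`, `user_uploads`, or `user_image_and_docx`.',
--     ] + lines
-- ===== Notes on version B (the rewrite author's own statement) =====
-- stated objective: simpler
-- what changed: B fuses A's two passes (normalize into a list of filtered dicts, then render each dict with default fallbacks) into a single loop that deduplicates and emits each rendered line directly, never building the intermediate dict list; the header is prepended once at the end iff any item survived.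
import Mathlib
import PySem

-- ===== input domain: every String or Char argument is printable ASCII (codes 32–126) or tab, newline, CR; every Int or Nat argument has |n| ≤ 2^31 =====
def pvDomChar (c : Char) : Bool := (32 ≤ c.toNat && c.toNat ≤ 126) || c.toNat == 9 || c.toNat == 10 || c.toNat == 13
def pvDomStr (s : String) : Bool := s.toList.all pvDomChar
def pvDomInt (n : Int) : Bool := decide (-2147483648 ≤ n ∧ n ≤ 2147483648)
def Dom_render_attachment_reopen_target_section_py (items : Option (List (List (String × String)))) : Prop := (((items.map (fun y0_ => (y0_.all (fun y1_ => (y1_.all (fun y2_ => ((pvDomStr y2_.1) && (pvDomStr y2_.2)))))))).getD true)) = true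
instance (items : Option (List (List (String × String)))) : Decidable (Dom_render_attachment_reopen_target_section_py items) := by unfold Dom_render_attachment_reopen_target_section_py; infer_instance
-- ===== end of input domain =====

-- B fuses A's normalize-then-render two-pass pipeline into one pass that emits each rendered
-- line directly, dropping the intermediate filtered-dict list (objective: simpler).

-- shared helpers: Python's `x or y` on strings, and `str(item.get(k) or '')`
def pvOrS (a b : String) : String := if a = "" then b else a

def pvGetS (item : List (String × String)) (k : String) : String :=
  ((PySem.Dict.mk item).get? k).getD ""

-- the fixed prelude lines (identical literal block in both Pythons)
def pvHeader : List String :=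
  [ "attachment_reopen_targets:",
    "- These uploaded files remain reopenable in later turns.",
    "- If a detached task must read one of them, copy the exact `path:` or `ref:` into `create_async_task.file_targets`.",
    "- `create_async_task.file_targets` is the authoritative reopen lane for detached tasks.",
    "- A bare filename like `resume.docx` is not a valid reopen target; use the exact absolute `path` or exact `ref`.",
    "- If you provide `path`, runtime rejects relative paths and paths that do not point to an existing file.",
    "- In `create_async_task.task`, describe why the file matters and how it should be used, but do not rely on prose alone for reopen handles.",
    "- Do not replace them with placeholders like `current_uploads`, `user_uploads`, or `user_image_and_docx`." ]

-- ===== PORT A =====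
-- loop body of _normalized_attachment_reopen_targets (the isinstance(item, dict) guard is
-- vacuously true under the declared type, each item IS a str->str dict)
def rat_stepA (st : List (PySem.Dict String String) × PySem.Set String)
    (item : List (String × String)) : List (PySem.Dict String String) × PySem.Set String :=
  let path := PySem.Str.strip (pvGetS item "path")
  let ref := PySem.Str.strip (pvGetS item "ref")
  if path = "" ∧ ref = "" then st
  else
    let dedupeKey := pvOrS ref path
    if dedupeKey = "" ∨ PySem.Set.contains st.2 dedupeKey then st
    else
      let entry : List (String × String) :=
        [ ("name", pvOrS (PySem.Str.strip (pvOrS (pvOrS (pvGetS item "name") path) ref)) (pvOrS path ref)),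
          ("kind", PySem.Str.strip (pvGetS item "kind")),
          ("mime_type", PySem.Str.strip (pvOrS (pvGetS item "mime_type") (pvGetS item "mimeType"))),
          ("path", path), ("ref", ref) ]
      (st.1 ++ [PySem.Dict.mk (entry.filter (fun kv => kv.2 ≠ ""))], PySem.Set.add st.2 dedupeKey)

def rat_normalized (items : Option (List (List (String × String)))) :
    List (PySem.Dict String String) :=
  ((items.getD []).foldl rat_stepA ([], PySem.Set.empty)).1

-- body of A's render loop
def rat_renderLine (item : PySem.Dict String String) : String :=
  let name := pvOrS (PySem.Str.strip ((item.get? "name").getD "")) "attachment"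
  let kind := pvOrS (PySem.Str.strip ((item.get? "kind").getD "")) "file"
  let mimeType := pvOrS (PySem.Str.strip ((item.get? "mime_type").getD "")) "application/octet-stream"
  let details := ["kind=" ++ kind, "mime_type=" ++ mimeType]
  let path := PySem.Str.strip ((item.get? "path").getD "")
  let ref := PySem.Str.strip ((item.get? "ref").getD "")
  let details := details ++ (if path = "" then [] else ["path=" ++ path])
  let details := details ++ (if ref = "" then [] else ["ref=" ++ ref])
  "- `" ++ name ++ "`: " ++ PySem.Str.join "; " details

def render_attachment_reopen_target_section_py (items : Option (List (List (String × String)))) : List String :=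
  let normalizedItems := rat_normalized items
  if normalizedItems = [] then []
  else normalizedItems.foldl (fun lines item => lines ++ [rat_renderLine item]) pvHeader

-- ===== PORT B =====
-- B's single loop body: filter, dedupe and render in one step
def rat_stepB (st : List String × PySem.Set String)
    (item : List (String × String)) : List String × PySem.Set String :=
  let path := PySem.Str.strip (pvGetS item "path")
  let ref := PySem.Str.strip (pvGetS item "ref")
  let key := pvOrS ref path
  if key = "" ∨ PySem.Set.contains st.2 key then st
  else
    let name := pvOrS (PySem.Str.strip (pvGetS item "name")) (pvOrS path ref)
    let kind := pvOrS (PySem.Str.strip (pvGetS item "kind")) "file"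
    let mime := pvOrS (PySem.Str.strip (pvOrS (pvGetS item "mime_type") (pvGetS item "mimeType"))) "application/octet-stream"
    let line := "- `" ++ name ++ "`: kind=" ++ kind ++ "; mime_type=" ++ mime
    let line := if path = "" then line else line ++ "; path=" ++ path
    let line := if ref = "" then line else line ++ "; ref=" ++ ref
    (st.1 ++ [line], PySem.Set.add st.2 key)

def render_attachment_reopen_target_section_py_alt (items : Option (List (List (String × String)))) : List String :=
  let lines := ((items.getD []).foldl rat_stepB ([], PySem.Set.empty)).1
  if lines = [] then [] else pvHeader ++ lines

-- ===== PRECONDITION & SPEC =====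
def Spec_render_attachment_reopen_target_section_py (items : Option (List (List (String × String)))) (out : List String) : Prop := out = render_attachment_reopen_target_section_py_alt items
instance (items : Option (List (List (String × String)))) (out : List String) : Decidable (Spec_render_attachment_reopen_target_section_py items out) := by unfold Spec_render_attachment_reopen_target_section_py; infer_instance

-- ===== CLAIM (what is proved, stated in full; the proofs are below) =====
def Claim_equal_render_attachment_reopen_target_section_py : Prop := ∀ (items : Option (List (List (String × String)))), Dom_render_attachment_reopen_target_section_py items → Spec_render_attachment_reopen_target_section_py items (render_attachment_reopen_target_section_py items)

-- ===== LEMMAS AND PROOFS =====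

theorem head?_dropWhile_false (p : Char → Bool) (l : List Char) :
    ∀ a, ((l.dropWhile p).head? = some a) → p a = false := by
  induction l with
  | nil => simp
  | cons x xs ih =>
    intro a h
    by_cases hx : p x
    · rw [List.dropWhile_cons_of_pos hx] at h; exact ih a h
    · rw [List.dropWhile_cons_of_neg hx] at h
      simp at h; subst h; simpa using hx

theorem dropWhile_eq_self_of_head (p : Char → Bool) (l : List Char)
    (h : ∀ a, l.head? = some a → p a = false) : l.dropWhile p = l := by
  cases l with
  | nil => rfl
  | cons x xs => simp [h x rfl]

theorem strip_idem_chars (l : List Char) :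
    PySem.Chars.strip (PySem.Chars.strip l) = PySem.Chars.strip l := by
  unfold PySem.Chars.strip PySem.Chars.rstrip PySem.Chars.lstrip
  set p := PySem.Chars.isspace
  set t := l.dropWhile p with ht
  have ht_head : ∀ a, t.head? = some a → p a = false := head?_dropWhile_false p l
  set u := (t.reverse.dropWhile p).reverse with hu
  have hpre : u <+: t := by
    have hs : t.reverse.dropWhile p <:+ t.reverse := List.dropWhile_suffix p
    have := List.reverse_prefix.mpr hs
    simpa [hu] using this
  have hu_head : ∀ a, u.head? = some a → p a = false := by
    intro a ha
    have hne : u ≠ [] := by intro h0; rw [h0] at ha; simp at ha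
    have : u.head? = t.head? := by
      obtain ⟨rest, hr⟩ := hpre
      cases hu' : u with
      | nil => exact absurd hu' hne
      | cons x xs => rw [← hr, hu']; simp
    exact ht_head a (this ▸ ha)
  have h1 : u.dropWhile p = u := dropWhile_eq_self_of_head p u hu_head
  rw [h1]
  have h2 : u.reverse.dropWhile p = u.reverse := by
    apply dropWhile_eq_self_of_head
    intro a ha
    rw [hu, List.reverse_reverse] at ha
    exact head?_dropWhile_false p t.reverse a ha
  rw [h2, hu, List.reverse_reverse]

theorem strip_idem (s : String) :
    PySem.Str.strip (PySem.Str.strip s) = PySem.Str.strip s := by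
  apply String.toList_inj.mp
  rw [PySem.Str.toList_strip, PySem.Str.toList_strip]
  exact strip_idem_chars s.toList

theorem strip_empty : PySem.Str.strip "" = "" := rfl

theorem pvOrS_eq_empty_iff (a b : String) : pvOrS a b = "" ↔ a = "" ∧ b = "" := by
  unfold pvOrS; by_cases h : a = "" <;> simp [h]

theorem strip_pvOrS_of_stripped (a b : String)
    (ha : PySem.Str.strip a = a) (hb : PySem.Str.strip b = b) :
    PySem.Str.strip (pvOrS a b) = pvOrS a b := by
  unfold pvOrS; split_ifs <;> [exact hb; exact ha]

-- A's rendering of a surviving normalized entry is exactly B's line for the same fields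
theorem renderLine_entry (n k m p r : String) (hn : n ≠ "")
    (hns : PySem.Str.strip n = n) (hks : PySem.Str.strip k = k)
    (hms : PySem.Str.strip m = m) (hps : PySem.Str.strip p = p)
    (hrs : PySem.Str.strip r = r) :
    rat_renderLine (PySem.Dict.mk (([("name", n), ("kind", k), ("mime_type", m),
        ("path", p), ("ref", r)] : List (String × String)).filter (fun kv => kv.2 ≠ ""))) =
      (let line := "- `" ++ n ++ "`: kind=" ++ pvOrS k "file" ++ "; mime_type=" ++ pvOrS m "application/octet-stream"
       let line := if p = "" then line else line ++ "; path=" ++ p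
       if r = "" then line else line ++ "; ref=" ++ r) := by
  unfold rat_renderLine pvOrS
  by_cases hk : k = "" <;> by_cases hm : m = "" <;> by_cases hp : p = "" <;> by_cases hr : r = "" <;>
    simp only [hk, hm, hp, hr, List.filter, ne_eq, not_true_eq_false, decide_false,
      decide_true, hn, not_false_eq_true] <;>
    simp [PySem.Dict.get?, hn, hk, hm, hp, hr, hns, hks, hms, hps, hrs, strip_empty] <;>
    (first
      | rfl
      | (apply String.toList_inj.mp;
         simp [PySem.Str.toList_join, PySem.Chars.join, List.intercalate, List.intersperse]))

-- one loop step of B mirrors one loop step of A through rat_renderLine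
set_option maxHeartbeats 1000000 in
theorem step_commutes (acc : List (PySem.Dict String String)) (s : PySem.Set String)
    (item : List (String × String)) :
    rat_stepB (acc.map rat_renderLine, s) item =
      ((rat_stepA (acc, s) item).1.map rat_renderLine, (rat_stepA (acc, s) item).2) := by
  unfold rat_stepA rat_stepB
  by_cases hpr : PySem.Str.strip (pvGetS item "path") = "" ∧ PySem.Str.strip (pvGetS item "ref") = ""
  · have hkey : pvOrS (PySem.Str.strip (pvGetS item "ref")) (PySem.Str.strip (pvGetS item "path")) = "" :=
      (pvOrS_eq_empty_iff _ _).mpr ⟨hpr.2, hpr.1⟩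
    simp only []
    rw [if_pos hpr, if_pos (Or.inl hkey : pvOrS (PySem.Str.strip (pvGetS item "ref")) (PySem.Str.strip (pvGetS item "path")) = "" ∨ PySem.Set.contains s (pvOrS (PySem.Str.strip (pvGetS item "ref")) (PySem.Str.strip (pvGetS item "path"))) = true)]
  · by_cases hseen : pvOrS (PySem.Str.strip (pvGetS item "ref")) (PySem.Str.strip (pvGetS item "path")) = "" ∨
        PySem.Set.contains s (pvOrS (PySem.Str.strip (pvGetS item "ref")) (PySem.Str.strip (pvGetS item "path"))) = true
    · simp only []
      rw [if_neg hpr, if_pos hseen, if_pos hseen]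
    · simp only []
      set p := PySem.Str.strip (pvGetS item "path") with hpdef
      set r := PySem.Str.strip (pvGetS item "ref") with hrdef
      have hkne : pvOrS r p ≠ "" := fun h0 => hseen (Or.inl h0)
      have hprne : pvOrS p r ≠ "" := by
        intro h0
        exact hkne ((pvOrS_eq_empty_iff _ _).mpr ⟨((pvOrS_eq_empty_iff _ _).mp h0).2, ((pvOrS_eq_empty_iff _ _).mp h0).1⟩)
      have hps : PySem.Str.strip p = p := by rw [hpdef]; exact strip_idem _
      have hrs : PySem.Str.strip r = r := by rw [hrdef]; exact strip_idem _
      -- A's name field equals B's name field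
      have hname : pvOrS (PySem.Str.strip (pvOrS (pvOrS (pvGetS item "name") p) r)) (pvOrS p r) =
          pvOrS (PySem.Str.strip (pvGetS item "name")) (pvOrS p r) := by
        by_cases hg : pvGetS item "name" = ""
        · have hor : pvOrS (pvOrS (pvGetS item "name") p) r = pvOrS p r := by
            simp [pvOrS, hg]
          rw [hor, strip_pvOrS_of_stripped p r hps hrs, hg, strip_empty]
          simp [pvOrS]
        · have hor : pvOrS (pvOrS (pvGetS item "name") p) r = pvGetS item "name" := by
            simp [pvOrS, hg]
          rw [hor]
      set nB := pvOrS (PySem.Str.strip (pvGetS item "name")) (pvOrS p r) with hnB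
      have hnBne : nB ≠ "" := by
        intro h0; exact hprne ((pvOrS_eq_empty_iff _ _).mp h0).2
      have hnBs : PySem.Str.strip nB = nB := by
        rw [hnB]
        exact strip_pvOrS_of_stripped _ _ (strip_idem _) (strip_pvOrS_of_stripped p r hps hrs)
      rw [if_neg hpr, if_neg hseen, if_neg hseen]
      rw [hname]
      simp only [List.map_append, List.map_cons, List.map_nil]
      rw [renderLine_entry nB (PySem.Str.strip (pvGetS item "kind"))
        (PySem.Str.strip (pvOrS (pvGetS item "mime_type") (pvGetS item "mimeType"))) p r
        hnBne hnBs (strip_idem _) (strip_idem _) hps hrs]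

-- the whole loop: B's accumulated lines are A's accumulated entries rendered
theorem loop_commutes (l : List (List (String × String))) :
    ∀ (acc : List (PySem.Dict String String)) (s : PySem.Set String),
      l.foldl rat_stepB (acc.map rat_renderLine, s) =
        ((l.foldl rat_stepA (acc, s)).1.map rat_renderLine, (l.foldl rat_stepA (acc, s)).2) := by
  induction l with
  | nil => intro acc s; rfl
  | cons item rest ih =>
    intro acc s
    rw [List.foldl_cons, List.foldl_cons, step_commutes acc s item]
    have := ih (rat_stepA (acc, s) item).1 (rat_stepA (acc, s) item).2
    simpa using this

-- ===== VERDICT (by name: the statement is the Claim_ definition above) =====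
theorem render_attachment_reopen_target_section_py_spec : Claim_equal_render_attachment_reopen_target_section_py := by
  intro items _
  unfold Spec_render_attachment_reopen_target_section_py
  unfold render_attachment_reopen_target_section_py render_attachment_reopen_target_section_py_alt
  unfold rat_normalized
  have h := loop_commutes (items.getD []) [] PySem.Set.empty
  simp only [List.map_nil] at h
  rw [h]
  set norm := ((items.getD []).foldl rat_stepA ([], PySem.Set.empty)).1 with hnorm
  by_cases h0 : norm = []
  · simp [h0]
  · have hmapne : norm.map rat_renderLine ≠ [] := by simpa using h0
    simp only [h0, hmapne, ite_false]
    rw [PySem.List.foldl_append_singleton_eq_map]
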